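-- pv_equiv track=rewrite | github.com/slyckmb/hashall | bin/qb-stoppeddl-drain.py | alias_variants
-- ===== SOURCE A (Python) =====
-- from typing import Dict, Iterable, List, Optional, Set, Tuple
--
-- def canonical_alias(path: str) -> str:
--     p = str(path or "").strip().rstrip("/")
--     if not p:
--         return ""
--     if p == "/stash/media":
--         return "/data/media"
--     if p.startswith("/stash/media/"):
--         return "/data/media/" + p[len("/stash/media/") :]
--     if p == "/pool/data/seeds":
--         return "/data/media/torrents/seeding"
--     if p.startswith("/pool/data/seeds/"):
--         return "/data/media/torrents/seeding/" + p[len("/pool/data/seeds/") :]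
--     if p == "/pool/data/cross-seed-link":
--         return "/data/media/torrents/seeding/cross-seed-link"
--     if p.startswith("/pool/data/cross-seed-link/"):
--         return "/data/media/torrents/seeding/cross-seed-link/" + p[len("/pool/data/cross-seed-link/") :]
--     if p == "/stash/media/downloads/torrents/seeding":
--         return "/data/media/torrents/seeding"
--     if p.startswith("/stash/media/downloads/torrents/seeding/"):
--         return "/data/media/torrents/seeding/" + p[len("/stash/media/downloads/torrents/seeding/") :]
--     return p
--
-- def alias_variants(path: str) -> List[str]:
--     p = str(path or "").strip().rstrip("/")
--     if not p:
--         return []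
--     out = [p, canonical_alias(p)]
--     if p == "/data/media" or p.startswith("/data/media/"):
--         out.append("/stash/media" + p[len("/data/media") :])
--     if p == "/stash/media" or p.startswith("/stash/media/"):
--         out.append("/data/media" + p[len("/stash/media") :])
--     if p == "/data/media/torrents/seeding" or p.startswith("/data/media/torrents/seeding/"):
--         out.append("/pool/data/seeds" + p[len("/data/media/torrents/seeding") :])
--         out.append("/stash/media/downloads/torrents/seeding" + p[len("/data/media/torrents/seeding") :])
--     if p == "/pool/data/seeds" or p.startswith("/pool/data/seeds/"):
--         out.append("/data/media/torrents/seeding" + p[len("/pool/data/seeds") :])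
--     if p == "/data/media/torrents/seeding/cross-seed-link" or p.startswith("/data/media/torrents/seeding/cross-seed-link/"):
--         out.append("/pool/data/cross-seed-link" + p[len("/data/media/torrents/seeding/cross-seed-link") :])
--     if p == "/pool/data/cross-seed-link" or p.startswith("/pool/data/cross-seed-link/"):
--         out.append("/data/media/torrents/seeding/cross-seed-link" + p[len("/pool/data/cross-seed-link") :])
--     dedup: List[str] = []
--     seen = set()
--     for cand in out:
--         c = cand.rstrip("/")
--         if c and c not in seen:
--             seen.add(c)
--             dedup.append(c)
--     return dedup
-- ===== SOURCE B (Python) =====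
-- from typing import List
--
-- # B works on path COMPONENTS: it splits the normalized path once on "/" and
-- # matches/builds variants by list-prefix pattern matching on segments (nested,
-- # mutually exclusive branches), instead of A's flat chain of string startswith
-- # tests and slicing. canonical_alias drops A's two unreachable
-- # "/stash/media/downloads/torrents/seeding" rules (shadowed by "/stash/media/").
--
-- def _join(segs: List[str]) -> str:
--     return "/".join(segs)
--
--
-- def canonical_alias(path: str) -> str:
--     p = str(path or "").strip().rstrip("/")
--     if not p:
--         return ""
--     segs = p.split("/")
--     if segs[:3] == ["", "stash", "media"]:
--         return _join(["", "data", "media"] + segs[3:])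
--     if segs[:4] == ["", "pool", "data", "seeds"]:
--         return _join(["", "data", "media", "torrents", "seeding"] + segs[4:])
--     if segs[:4] == ["", "pool", "data", "cross-seed-link"]:
--         return _join(["", "data", "media", "torrents", "seeding", "cross-seed-link"] + segs[4:])
--     return p
--
--
-- def alias_variants(path: str) -> List[str]:
--     p = str(path or "").strip().rstrip("/")
--     if not p:
--         return []
--     segs = p.split("/")
--     out = [p, canonical_alias(p)]
--     if segs[:3] == ["", "data", "media"]:
--         rest = segs[3:]
--         out.append(_join(["", "stash", "media"] + rest))
--         if rest[:2] == ["torrents", "seeding"]: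
--             sub = rest[2:]
--             out.append(_join(["", "pool", "data", "seeds"] + sub))
--             out.append(_join(["", "stash", "media", "downloads", "torrents", "seeding"] + sub))
--             if sub[:1] == ["cross-seed-link"]:
--                 out.append(_join(["", "pool", "data", "cross-seed-link"] + sub[1:]))
--     elif segs[:3] == ["", "stash", "media"]:
--         out.append(_join(["", "data", "media"] + segs[3:]))
--     elif segs[:4] == ["", "pool", "data", "seeds"]:
--         out.append(_join(["", "data", "media", "torrents", "seeding"] + segs[4:]))
--     elif segs[:4] == ["", "pool", "data", "cross-seed-link"]:
--         out.append(_join(["", "data", "media", "torrents", "seeding", "cross-seed-link"] + segs[4:]))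
--     return [c for c in dict.fromkeys(cand.rstrip("/") for cand in out) if c]
-- ===== Notes on version B (the rewrite author's own statement) =====
-- stated objective: alternative
-- what changed: B splits the normalized path once into its slash-separated components and matches/builds the alias variants by nested, mutually exclusive list-prefix pattern matching on segments (rebuilding each variant with a join of segment lists), instead of A's flat chain of string startswith tests with character slicing; B's canonical_alias drops A's two unreachable rules (shadowed by an earlier prefix rule) and the manual seen-set dedup loop becomes dict.fromkeys ordered dedup.
import Mathlib
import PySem

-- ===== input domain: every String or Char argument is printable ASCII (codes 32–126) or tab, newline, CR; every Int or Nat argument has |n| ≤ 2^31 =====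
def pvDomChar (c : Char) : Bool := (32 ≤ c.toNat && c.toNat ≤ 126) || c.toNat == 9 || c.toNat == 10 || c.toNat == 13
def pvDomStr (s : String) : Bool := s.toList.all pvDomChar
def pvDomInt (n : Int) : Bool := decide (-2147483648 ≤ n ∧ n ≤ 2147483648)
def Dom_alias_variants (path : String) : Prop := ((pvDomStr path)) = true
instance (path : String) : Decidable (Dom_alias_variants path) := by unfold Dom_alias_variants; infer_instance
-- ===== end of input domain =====

-- B splits the normalized path once into '/'-separated components and matches/builds
-- the alias variants by nested list-prefix pattern matching on segments (rebuilding
-- with '/'.join), instead of A's flat chain of string startswith tests with slicing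
-- (objective: alternative).

-- shared primitive: exact port of Python's s.rstrip("/") (PySem has no char-set rstrip)
def rstripSlash (cs : List Char) : List Char := (cs.reverse.dropWhile (fun c => c == '/')).reverse

-- ===== PORT A =====
-- A-side helper: canonical_alias on the char list (str(path or "") is the identity on str)
def canonicalAliasA (cs : List Char) : List Char :=
  let p := rstripSlash (PySem.Chars.strip cs)
  if p = [] then []
  else if p = "/stash/media".toList then "/data/media".toList
  else if PySem.Chars.startswith p "/stash/media/".toList then "/data/media/".toList ++ p.drop 13
  else if p = "/pool/data/seeds".toList then "/data/media/torrents/seeding".toList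
  else if PySem.Chars.startswith p "/pool/data/seeds/".toList then "/data/media/torrents/seeding/".toList ++ p.drop 17
  else if p = "/pool/data/cross-seed-link".toList then "/data/media/torrents/seeding/cross-seed-link".toList
  else if PySem.Chars.startswith p "/pool/data/cross-seed-link/".toList then "/data/media/torrents/seeding/cross-seed-link/".toList ++ p.drop 27
  else if p = "/stash/media/downloads/torrents/seeding".toList then "/data/media/torrents/seeding".toList
  else if PySem.Chars.startswith p "/stash/media/downloads/torrents/seeding/".toList then "/data/media/torrents/seeding/".toList ++ p.drop 40
  else p

def alias_variants (path : String) : List String :=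
  let p := rstripSlash (PySem.Chars.strip path.toList)
  if p = [] then []
  else
    let out := [p, canonicalAliasA p]
    let out := if p == "/data/media".toList || PySem.Chars.startswith p "/data/media/".toList
               then out ++ ["/stash/media".toList ++ p.drop 11] else out
    let out := if p == "/stash/media".toList || PySem.Chars.startswith p "/stash/media/".toList
               then out ++ ["/data/media".toList ++ p.drop 12] else out
    let out := if p == "/data/media/torrents/seeding".toList || PySem.Chars.startswith p "/data/media/torrents/seeding/".toList
               then (out ++ ["/pool/data/seeds".toList ++ p.drop 28]) ++ ["/stash/media/downloads/torrents/seeding".toList ++ p.drop 28] else out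
    let out := if p == "/pool/data/seeds".toList || PySem.Chars.startswith p "/pool/data/seeds/".toList
               then out ++ ["/data/media/torrents/seeding".toList ++ p.drop 16] else out
    let out := if p == "/data/media/torrents/seeding/cross-seed-link".toList || PySem.Chars.startswith p "/data/media/torrents/seeding/cross-seed-link/".toList
               then out ++ ["/pool/data/cross-seed-link".toList ++ p.drop 44] else out
    let out := if p == "/pool/data/cross-seed-link".toList || PySem.Chars.startswith p "/pool/data/cross-seed-link/".toList
               then out ++ ["/data/media/torrents/seeding/cross-seed-link".toList ++ p.drop 26] else out
    let st := out.foldl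
      (fun (acc : List (List Char) × PySem.Set (List Char)) cand =>
        let c := rstripSlash cand
        if c ≠ [] ∧ PySem.Set.contains acc.2 c = false then (acc.1 ++ [c], PySem.Set.add acc.2 c)
        else acc)
      ([], PySem.Set.ofList [])
    st.1.map String.ofList

-- ===== PORT B =====
-- Source B's _join helper: "/".join(segs)
def joinSl (parts : List (List Char)) : List Char := PySem.Chars.join ['/'] parts

def canonicalAliasB (cs : List Char) : List Char :=
  let p := rstripSlash (PySem.Chars.strip cs)
  if p = [] then []
  else
    let segs := PySem.Chars.splitOn p ['/']
    if segs.take 3 == [[], "stash".toList, "media".toList] then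
      joinSl ([[], "data".toList, "media".toList] ++ segs.drop 3)
    else if segs.take 4 == [[], "pool".toList, "data".toList, "seeds".toList] then
      joinSl ([[], "data".toList, "media".toList, "torrents".toList, "seeding".toList] ++ segs.drop 4)
    else if segs.take 4 == [[], "pool".toList, "data".toList, "cross-seed-link".toList] then
      joinSl ([[], "data".toList, "media".toList, "torrents".toList, "seeding".toList, "cross-seed-link".toList] ++ segs.drop 4)
    else p

def alias_variants_alt (path : String) : List String :=
  let p := rstripSlash (PySem.Chars.strip path.toList)
  if p = [] then []
  else
    let segs := PySem.Chars.splitOn p ['/']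
    let out := [p, canonicalAliasB p] ++
      (if segs.take 3 == [[], "data".toList, "media".toList] then
        let rest := segs.drop 3
        [joinSl ([[], "stash".toList, "media".toList] ++ rest)] ++
        (if rest.take 2 == ["torrents".toList, "seeding".toList] then
          let sub := rest.drop 2
          [joinSl ([[], "pool".toList, "data".toList, "seeds".toList] ++ sub),
           joinSl ([[], "stash".toList, "media".toList, "downloads".toList, "torrents".toList, "seeding".toList] ++ sub)] ++
          (if sub.take 1 == ["cross-seed-link".toList] then
            [joinSl ([[], "pool".toList, "data".toList, "cross-seed-link".toList] ++ sub.drop 1)]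
          else [])
        else [])
      else if segs.take 3 == [[], "stash".toList, "media".toList] then
        [joinSl ([[], "data".toList, "media".toList] ++ segs.drop 3)]
      else if segs.take 4 == [[], "pool".toList, "data".toList, "seeds".toList] then
        [joinSl ([[], "data".toList, "media".toList, "torrents".toList, "seeding".toList] ++ segs.drop 4)]
      else if segs.take 4 == [[], "pool".toList, "data".toList, "cross-seed-link".toList] then
        [joinSl ([[], "data".toList, "media".toList, "torrents".toList, "seeding".toList, "cross-seed-link".toList] ++ segs.drop 4)]
      else [])
    (((PySem.List.dedup (out.map rstripSlash)).filter (fun c => c ≠ [])).map String.ofList)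

-- ===== PRECONDITION & SPEC =====
def Spec_alias_variants (path : String) (out : List String) : Prop := out = alias_variants_alt path
instance (path : String) (out : List String) : Decidable (Spec_alias_variants path out) := by unfold Spec_alias_variants; infer_instance

-- ===== CLAIM (what is proved, stated in full; the proofs are below) =====
def Claim_equal_alias_variants : Prop := ∀ (path : String), Dom_alias_variants path → Spec_alias_variants path (alias_variants path)

-- ===== LEMMAS AND PROOFS =====

-- A's dedup fold computes ordered dedup of the rstripped candidates
theorem dedup_loop (out dd : List (List Char)) (seen : PySem.Set (List Char)) :
    (out.foldl
      (fun (acc : List (List Char) × PySem.Set (List Char)) cand =>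
        let c := rstripSlash cand
        if c ≠ [] ∧ PySem.Set.contains acc.2 c = false then (acc.1 ++ [c], PySem.Set.add acc.2 c)
        else acc)
      (dd, seen)).1
    = dd ++ (PySem.List.dedup (out.map rstripSlash)).filter
        (fun c => c ≠ [] && !(PySem.Set.contains seen c)) := by
  induction out generalizing dd seen with
  | nil => simp [PySem.List.dedup, PySem.Set.ofList]
  | cons a rest ih =>
    simp only [List.foldl_cons, List.map_cons]
    rw [PySem.List.dedup_eq_ofList, PySem.Set.ofList_cons]
    by_cases hc : rstripSlash a ≠ [] ∧ PySem.Set.contains seen (rstripSlash a) = false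
    · have hadd : PySem.Set.add seen (rstripSlash a) = seen ++ [rstripSlash a] := by
        unfold PySem.Set.add; rw [hc.2]; simp
      have hstep : (if rstripSlash a ≠ [] ∧ PySem.Set.contains seen (rstripSlash a) = false
            then (dd ++ [rstripSlash a], PySem.Set.add seen (rstripSlash a)) else (dd, seen))
          = (dd ++ [rstripSlash a], seen ++ [rstripSlash a]) := by rw [if_pos hc, hadd]
      simp only [hstep, ih]
      have hpred : (fun c => decide (c ≠ []) && !(PySem.Set.contains (seen ++ [rstripSlash a]) c))
          = (fun c => (decide (c ≠ []) && !(PySem.Set.contains seen c)) && !(c == rstripSlash a)) := by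
        funext c
        by_cases h : c = rstripSlash a
        · simp [h, PySem.Set.contains, hc.1]
        · simp [PySem.Set.contains, List.contains_eq_mem, h]
      rw [hpred]
      have hfc : (decide (rstripSlash a ≠ []) && !(PySem.Set.contains seen (rstripSlash a))) = true := by
        have h2 := hc.2
        simp [PySem.Set.contains, List.contains_eq_mem] at h2
        simp [hc.1, h2]
      rw [← PySem.List.dedup_eq_ofList, ← List.filter_filter]
      simp only [PySem.Set.discard, List.filter_cons, hfc]
      simp [List.append_assoc]
    · have hstep : (if rstripSlash a ≠ [] ∧ PySem.Set.contains seen (rstripSlash a) = false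
            then (dd ++ [rstripSlash a], PySem.Set.add seen (rstripSlash a)) else (dd, seen))
          = (dd, seen) := by rw [if_neg hc]
      simp only [hstep, ih]
      have hfc : (decide (rstripSlash a ≠ []) && !(PySem.Set.contains seen (rstripSlash a))) = false := by
        rcases not_and_or.mp hc with h | h
        · simp at h; simp [h]
        · simp only [Bool.not_eq_false] at h
          simp
          exact fun _ => (PySem.Set.contains_iff seen _).mp h
      rw [← PySem.List.dedup_eq_ofList]
      simp only [PySem.Set.discard, List.filter_cons, hfc]
      simp only [Bool.false_eq_true, if_false, List.filter_filter]
      congr 1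
      apply List.filter_congr
      intro x _
      by_cases h : x = rstripSlash a
      · subst h
        simp only [Bool.and_assoc]
        simp
        intro hne
        by_cases hm : PySem.Set.contains seen (rstripSlash a) = true
        · exact (PySem.Set.contains_iff seen _).mp hm
        · exfalso
          simp only [Bool.not_eq_true] at hm
          simp [hne] at hfc
          rw [(PySem.Set.contains_iff seen _).mpr hfc] at hm
          exact Bool.true_eq_false.mp hm
      · simp [h]


theorem modifyHead_append_left {α : Type} (f : α → α) (xs ys : List α) (h : xs ≠ []) :
    (xs ++ ys).modifyHead f = xs.modifyHead f ++ ys := by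
  cases xs with
  | nil => exact absurd rfl h
  | cons a t => simp

theorem splitOn_cons_char (c : Char) (l : List Char) :
    (c :: l).splitOn '/' = if c = '/' then [] :: l.splitOn '/' else (l.splitOn '/').modifyHead (c :: ·) := by
  simp only [List.splitOn, List.splitOnP_cons]
  by_cases hc : c = '/' <;> simp [hc]

theorem go_spec (fuel : Nat) (l cur : List Char) (acc : List (List Char)) (h : l.length < fuel) :
    PySem.Chars.splitOn.go ['/'] fuel l cur acc
      = acc.reverse ++ (l.splitOn '/').modifyHead (cur.reverse ++ ·) := by
  induction fuel generalizing l cur acc with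
  | zero => omega
  | succ n ih =>
    cases l with
    | nil =>
      rw [PySem.Chars.splitOn.go]
      simp [List.splitOn_nil]
      omega
    | cons c rest =>
      rw [PySem.Chars.splitOn.go]
      by_cases hc : c = '/'
      · subst hc
        have hpre : List.isPrefixOf ['/'] ('/' :: rest) = true := by simp [List.isPrefixOf]
        rw [if_pos hpre]
        have hdrop : List.drop (['/'] : List Char).length ('/' :: rest) = rest := by simp
        rw [hdrop, ih rest [] ((cur.reverse) :: acc) (by simp at h ⊢; omega)]
        rw [splitOn_cons_char]
        cases rest.splitOn '/' <;> simp
      · have hpre : List.isPrefixOf ['/'] (c :: rest) = false := by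
          simp [List.isPrefixOf]; exact fun hh => hc hh.symm
        rw [if_neg (by simp [hpre])]
        rw [ih rest (c :: cur) acc (by simp at h ⊢; omega)]
        rw [splitOn_cons_char, if_neg hc, List.modifyHead_modifyHead]
        simp [Function.comp_def]

theorem splitOn_eq (s : List Char) : PySem.Chars.splitOn s ['/'] = s.splitOn '/' := by
  unfold PySem.Chars.splitOn
  rw [go_spec s.length.succ s [] [] (by omega)]
  cases hs : s.splitOn '/' with
  | nil => exact absurd hs (by simp [List.splitOn]; exact List.splitOnP_ne_nil _ s)
  | cons a t => simp

theorem splitOn_append (a b : List Char) :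
    (a ++ '/' :: b).splitOn '/' = a.splitOn '/' ++ b.splitOn '/' := by
  induction a with
  | nil => simp [splitOn_cons_char, List.splitOn_nil]
  | cons c t ih =>
    rw [List.cons_append, splitOn_cons_char, splitOn_cons_char, ih]
    by_cases hc : c = '/'
    · simp [hc]
    · rw [if_neg hc, if_neg hc, modifyHead_append_left _ _ _ (by simp [List.splitOn]; exact List.splitOnP_ne_nil _ t)]

theorem inter_app (xs ys : List (List Char)) (hxs : xs ≠ []) (hys : ys ≠ []) :
    ['/'].intercalate (xs ++ ys) = ['/'].intercalate xs ++ '/' :: ['/'].intercalate ys := by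
  induction xs with
  | nil => exact absurd rfl hxs
  | cons a t ih =>
    cases t with
    | nil =>
      cases ys with
      | nil => exact absurd rfl hys
      | cons y ty => simp [List.intercalate, List.intersperse]
    | cons b tb =>
      rw [List.cons_append]
      have h1 : ['/'].intercalate (a :: ((b :: tb) ++ ys)) = a ++ ['/'] ++ ['/'].intercalate ((b :: tb) ++ ys) := by
        simp [List.intercalate]
      have h2 : ['/'].intercalate (a :: b :: tb) = a ++ ['/'] ++ ['/'].intercalate (b :: tb) := by
        simp [List.intercalate, List.intersperse]
      rw [h1, ih (by simp) , h2]
      simp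

theorem splitOn_ne_nil' (l : List Char) : l.splitOn '/' ≠ [] := by
  simp [List.splitOn]; exact List.splitOnP_ne_nil _ l

theorem take_splitOn_iff (p a : List Char) :
    (p.splitOn '/').take ((a.splitOn '/').length) = a.splitOn '/' ↔ (p = a ∨ (a ++ ['/']) <+: p) := by
  constructor
  · intro h
    by_cases hd : (p.splitOn '/').drop ((a.splitOn '/').length) = []
    · left
      have hs : p.splitOn '/' = a.splitOn '/' := by
        conv_lhs => rw [← List.take_append_drop ((a.splitOn '/').length) (p.splitOn '/')]
        rw [h, hd, List.append_nil]
      have := List.intercalate_splitOn p '/'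
      rw [hs, List.intercalate_splitOn] at this
      exact this.symm
    · right
      have hs : p.splitOn '/' = a.splitOn '/' ++ (p.splitOn '/').drop ((a.splitOn '/').length) := by
        conv_lhs => rw [← List.take_append_drop ((a.splitOn '/').length) (p.splitOn '/')]
        rw [h]
      have hp : p = ['/'].intercalate (a.splitOn '/' ++ (p.splitOn '/').drop ((a.splitOn '/').length)) := by
        conv_lhs => rw [← List.intercalate_splitOn p '/']
        rw [← hs]
      rw [inter_app _ _ (splitOn_ne_nil' a) hd, List.intercalate_splitOn] at hp
      refine ⟨['/'].intercalate ((p.splitOn '/').drop ((a.splitOn '/').length)), ?_⟩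
      conv_rhs => rw [hp]
      simp
  · rintro (rfl | ⟨r, hr⟩)
    · exact List.take_length
    · have : p = a ++ '/' :: r := by rw [← hr]; simp
      subst this
      rw [splitOn_append]
      exact List.take_left' rfl

theorem cond_eq (p a : List Char) :
    (((p.splitOn '/').take ((a.splitOn '/').length)) == a.splitOn '/')
      = (p == a || PySem.Chars.startswith p (a ++ ['/'])) := by
  rw [Bool.eq_iff_iff]
  simp only [beq_iff_eq, Bool.or_eq_true, PySem.Chars.startswith_iff]
  rw [take_splitOn_iff]

theorem variant_eq (p a : List Char) (rs : List (List Char)) (hrs : rs ≠ [])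
    (h : p = a ∨ (a ++ ['/']) <+: p) :
    joinSl (rs ++ (p.splitOn '/').drop ((a.splitOn '/').length))
      = ['/'].intercalate rs ++ p.drop a.length := by
  have hja : ∀ parts, joinSl parts = ['/'].intercalate parts := fun _ => rfl
  rcases h with rfl | ⟨r, hr⟩
  · rw [List.drop_length, List.drop_length, hja, List.append_nil, List.append_nil]
  · have : p = a ++ '/' :: r := by rw [← hr]; simp
    subst this
    rw [splitOn_append, List.drop_left' rfl, hja,
        inter_app _ _ hrs (splitOn_ne_nil' r), List.intercalate_splitOn,
        List.drop_left]

theorem cond_prefix {p a : List Char} (h : (p == a || PySem.Chars.startswith p (a ++ ['/'])) = true) :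
    a <+: p := by
  rcases Bool.or_eq_true_iff.mp h with h | h
  · exact (beq_iff_eq.mp h) ▸ List.prefix_refl a
  · exact List.IsPrefix.trans ⟨['/'], rfl⟩ ((PySem.Chars.startswith_iff p _).mp h)

theorem take_of_prefix {p a : List Char} (h : a <+: p) (n : Nat) (hn : n ≤ a.length) :
    p.take n = a.take n := by
  obtain ⟨t, rfl⟩ := h
  rw [List.take_append_of_le_length hn]

theorem clash {p a b : List Char} (ha : a <+: p) (hb : b <+: p) (n : Nat)
    (hna : n ≤ a.length) (hnb : n ≤ b.length) (hne : a.take n ≠ b.take n) : False :=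
  hne (by rw [← take_of_prefix ha n hna, ← take_of_prefix hb n hnb])


theorem cond_cases {q a : List Char} (h : (q == a || PySem.Chars.startswith q (a ++ ['/'])) = true) :
    q = a ∨ (a ++ ['/']) <+: q := by
  rcases Bool.or_eq_true_iff.mp h with h | h
  · exact Or.inl (beq_iff_eq.mp h)
  · exact Or.inr ((PySem.Chars.startswith_iff q _).mp h)

theorem condA_false {q a b : List Char} (hpre : a <+: q) (n : Nat) (hna : n ≤ a.length)
    (hnb : n ≤ b.length) (hne : a.take n ≠ b.take n) :
    (q == b || PySem.Chars.startswith q (b ++ ['/'])) = false := by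
  by_contra h
  have hb : b <+: q := cond_prefix (Bool.not_eq_false _ ▸ h)
  exact clash hpre hb n hna hnb hne

theorem sw_mono {q a b : List Char} (hab : a <+: b) (h : PySem.Chars.startswith q b = true) :
    PySem.Chars.startswith q a = true :=
  (PySem.Chars.startswith_iff q a).mpr (hab.trans ((PySem.Chars.startswith_iff q b).mp h))

theorem ne_of_swpre {q a : List Char} (h : PySem.Chars.startswith q (a ++ ['/']) = true) : q ≠ a := by
  obtain ⟨r, hr⟩ := (PySem.Chars.startswith_iff q _).mp h
  intro he
  rw [he] at hr
  apply_fun List.length at hr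
  simp [List.length_append] at hr

theorem shift {q a : List Char} (h : (a ++ ['/']) <+: q) (d : List Char) :
    d ++ q.drop a.length = (d ++ ['/']) ++ q.drop (a.length + 1) := by
  obtain ⟨r, hr⟩ := h
  have hq : q = a ++ '/' :: r := by rw [← hr]; simp
  subst hq
  rw [List.drop_left' rfl]
  rw [show a ++ '/' :: r = (a ++ ['/']) ++ r from by simp]
  rw [List.drop_left' (by simp)]
  simp

theorem or_parts {x y : Bool} (h : ¬((x || y) = true)) : x = false ∧ y = false := by
  rcases Bool.or_eq_false_iff.mp (Bool.not_eq_true _ ▸ h) with ⟨h1, h2⟩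
  exact ⟨h1, h2⟩

theorem canon_eq (cs : List Char) : canonicalAliasB cs = canonicalAliasA cs := by
  unfold canonicalAliasA canonicalAliasB
  generalize rstripSlash (PySem.Chars.strip cs) = q
  by_cases hq : q = []
  · simp [hq]
  rw [if_neg hq, if_neg hq, splitOn_eq]
  rw [show ("/stash/media/".toList : List Char) = "/stash/media".toList ++ ['/'] from rfl,
      show ("/pool/data/seeds/".toList : List Char) = "/pool/data/seeds".toList ++ ['/'] from rfl,
      show ("/pool/data/cross-seed-link/".toList : List Char) = "/pool/data/cross-seed-link".toList ++ ['/'] from rfl,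
      show ("/stash/media/downloads/torrents/seeding/".toList : List Char) = "/stash/media/downloads/torrents/seeding".toList ++ ['/'] from rfl,
      show ("/data/media/".toList : List Char) = "/data/media".toList ++ ['/'] from rfl,
      show ("/data/media/torrents/seeding/".toList : List Char) = "/data/media/torrents/seeding".toList ++ ['/'] from rfl,
      show ("/data/media/torrents/seeding/cross-seed-link/".toList : List Char) = "/data/media/torrents/seeding/cross-seed-link".toList ++ ['/'] from rfl]
  simp only []
  have hb_sm : (((q.splitOn '/').take 3) == [[], "stash".toList, "media".toList])
      = (q == "/stash/media".toList || PySem.Chars.startswith q ("/stash/media".toList ++ ['/'])) := by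
    have h := cond_eq q "/stash/media".toList
    rw [show "/stash/media".toList.splitOn '/' = [[], "stash".toList, "media".toList] from by decide] at h
    rw [show ([[], "stash".toList, "media".toList] : List (List Char)).length = 3 from rfl] at h
    exact h
  have hb_ps : (((q.splitOn '/').take 4) == [[], "pool".toList, "data".toList, "seeds".toList])
      = (q == "/pool/data/seeds".toList || PySem.Chars.startswith q ("/pool/data/seeds".toList ++ ['/'])) := by
    have h := cond_eq q "/pool/data/seeds".toList
    rw [show "/pool/data/seeds".toList.splitOn '/' = [[], "pool".toList, "data".toList, "seeds".toList] from by decide] at h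
    rw [show ([[], "pool".toList, "data".toList, "seeds".toList] : List (List Char)).length = 4 from rfl] at h
    exact h
  have hb_pc : (((q.splitOn '/').take 4) == [[], "pool".toList, "data".toList, "cross-seed-link".toList])
      = (q == "/pool/data/cross-seed-link".toList || PySem.Chars.startswith q ("/pool/data/cross-seed-link".toList ++ ['/'])) := by
    have h := cond_eq q "/pool/data/cross-seed-link".toList
    rw [show "/pool/data/cross-seed-link".toList.splitOn '/' = [[], "pool".toList, "data".toList, "cross-seed-link".toList] from by decide] at h
    rw [show ([[], "pool".toList, "data".toList, "cross-seed-link".toList] : List (List Char)).length = 4 from rfl] at h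
    exact h
  rw [hb_sm, hb_ps, hb_pc]
  by_cases h1 : (q == "/stash/media".toList || PySem.Chars.startswith q ("/stash/media".toList ++ ['/'])) = true
  · rw [if_pos h1]
    rcases cond_cases h1 with rfl | hpre
    · decide
    · have hsw : PySem.Chars.startswith q ("/stash/media".toList ++ ['/']) = true :=
        (PySem.Chars.startswith_iff q _).mpr hpre
      rw [if_neg (ne_of_swpre hsw), if_pos hsw]
      have hv := variant_eq q "/stash/media".toList [[], "data".toList, "media".toList] (by simp) (Or.inr hpre)
      rw [show "/stash/media".toList.splitOn '/' = [[], "stash".toList, "media".toList] from by decide] at hv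
      rw [show ([[], "stash".toList, "media".toList] : List (List Char)).length = 3 from rfl,
          show ("/stash/media".toList : List Char).length = 12 from rfl] at hv
      rw [hv, show ['/'].intercalate [[], "data".toList, "media".toList] = "/data/media".toList from by decide]
      have hs := shift hpre "/data/media".toList
      rw [show ("/stash/media".toList : List Char).length = 12 from rfl] at hs
      exact hs
  · rw [if_neg h1]
    obtain ⟨he_sm, hw_sm⟩ := or_parts h1
    have hne_sm : ¬ q = "/stash/media".toList := beq_eq_false_iff_ne.mp he_sm
    have hnsw_sm : ¬ PySem.Chars.startswith q ("/stash/media".toList ++ ['/']) = true := by simpa using hw_sm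
    rw [if_neg hne_sm, if_neg hnsw_sm]
    by_cases h2 : (q == "/pool/data/seeds".toList || PySem.Chars.startswith q ("/pool/data/seeds".toList ++ ['/'])) = true
    · rw [if_pos h2]
      rcases cond_cases h2 with rfl | hpre
      · decide
      · have hsw : PySem.Chars.startswith q ("/pool/data/seeds".toList ++ ['/']) = true :=
          (PySem.Chars.startswith_iff q _).mpr hpre
        rw [if_neg (ne_of_swpre hsw), if_pos hsw]
        have hv := variant_eq q "/pool/data/seeds".toList
          [[], "data".toList, "media".toList, "torrents".toList, "seeding".toList] (by simp) (Or.inr hpre)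
        rw [show "/pool/data/seeds".toList.splitOn '/' = [[], "pool".toList, "data".toList, "seeds".toList] from by decide] at hv
        rw [show ([[], "pool".toList, "data".toList, "seeds".toList] : List (List Char)).length = 4 from rfl,
            show ("/pool/data/seeds".toList : List Char).length = 16 from rfl] at hv
        rw [hv, show ['/'].intercalate [[], "data".toList, "media".toList, "torrents".toList, "seeding".toList] = "/data/media/torrents/seeding".toList from by decide]
        have hs := shift hpre "/data/media/torrents/seeding".toList
        rw [show ("/pool/data/seeds".toList : List Char).length = 16 from rfl] at hs
        exact hs
    · rw [if_neg h2]
      obtain ⟨he_ps, hw_ps⟩ := or_parts h2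
      have hne_ps : ¬ q = "/pool/data/seeds".toList := beq_eq_false_iff_ne.mp he_ps
      have hnsw_ps : ¬ PySem.Chars.startswith q ("/pool/data/seeds".toList ++ ['/']) = true := by simpa using hw_ps
      rw [if_neg hne_ps, if_neg hnsw_ps]
      by_cases h3 : (q == "/pool/data/cross-seed-link".toList || PySem.Chars.startswith q ("/pool/data/cross-seed-link".toList ++ ['/'])) = true
      · rw [if_pos h3]
        rcases cond_cases h3 with rfl | hpre
        · decide
        · have hsw : PySem.Chars.startswith q ("/pool/data/cross-seed-link".toList ++ ['/']) = true :=
            (PySem.Chars.startswith_iff q _).mpr hpre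
          rw [if_neg (ne_of_swpre hsw), if_pos hsw]
          have hv := variant_eq q "/pool/data/cross-seed-link".toList
            [[], "data".toList, "media".toList, "torrents".toList, "seeding".toList, "cross-seed-link".toList] (by simp) (Or.inr hpre)
          rw [show "/pool/data/cross-seed-link".toList.splitOn '/' = [[], "pool".toList, "data".toList, "cross-seed-link".toList] from by decide] at hv
          rw [show ([[], "pool".toList, "data".toList, "cross-seed-link".toList] : List (List Char)).length = 4 from rfl,
              show ("/pool/data/cross-seed-link".toList : List Char).length = 26 from rfl] at hv
          rw [hv, show ['/'].intercalate [[], "data".toList, "media".toList, "torrents".toList, "seeding".toList, "cross-seed-link".toList] = "/data/media/torrents/seeding/cross-seed-link".toList from by decide]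
          have hs := shift hpre "/data/media/torrents/seeding/cross-seed-link".toList
          rw [show ("/pool/data/cross-seed-link".toList : List Char).length = 26 from rfl] at hs
          exact hs
      · rw [if_neg h3]
        obtain ⟨he_pc, hw_pc⟩ := or_parts h3
        have hne_pc : ¬ q = "/pool/data/cross-seed-link".toList := beq_eq_false_iff_ne.mp he_pc
        have hnsw_pc : ¬ PySem.Chars.startswith q ("/pool/data/cross-seed-link".toList ++ ['/']) = true := by simpa using hw_pc
        rw [if_neg hne_pc, if_neg hnsw_pc]
        have hdl_ne : q ≠ "/stash/media/downloads/torrents/seeding".toList := by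
          intro he
          rw [he] at hw_sm
          rw [show PySem.Chars.startswith "/stash/media/downloads/torrents/seeding".toList ("/stash/media".toList ++ ['/']) = true from by decide] at hw_sm
          exact Bool.true_eq_false.mp hw_sm
        have hdl_sw : PySem.Chars.startswith q ("/stash/media/downloads/torrents/seeding".toList ++ ['/']) = false := by
          by_contra h
          have := sw_mono (b := "/stash/media/downloads/torrents/seeding".toList ++ ['/'])
            (a := "/stash/media".toList ++ ['/']) (by decide) (Bool.not_eq_false _ ▸ h)
          rw [this] at hw_sm
          exact Bool.true_eq_false.mp hw_sm
        have hnsw_dl : ¬ PySem.Chars.startswith q ("/stash/media/downloads/torrents/seeding".toList ++ ['/']) = true := by simpa using hdl_sw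
        rw [if_neg hdl_ne, if_neg hnsw_dl]


theorem imp_c1 {p : List Char} (a : List Char)
    (h : (p == a || PySem.Chars.startswith p (a ++ ['/'])) = true)
    (hsub : ("/data/media".toList ++ ['/']) <+: a) :
    (p == "/data/media".toList || PySem.Chars.startswith p ("/data/media".toList ++ ['/'])) = true := by
  have hp := cond_prefix h
  exact Bool.or_eq_true_iff.mpr (Or.inr ((PySem.Chars.startswith_iff _ _).mpr (hsub.trans hp)))

theorem main_eq (path : String) : alias_variants path = alias_variants_alt path := by
  unfold alias_variants alias_variants_alt
  generalize rstripSlash (PySem.Chars.strip path.toList) = p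
  by_cases hp : p = []
  · simp [hp]
  rw [if_neg hp, if_neg hp]
  simp only []
  rw [dedup_loop]
  have hseen : (fun c : List Char => decide (c ≠ []) && !(PySem.Set.contains (PySem.Set.ofList []) c))
      = (fun c : List Char => decide (c ≠ [])) := by
    funext c
    simp [PySem.Set.ofList, PySem.Set.contains]
  rw [hseen]
  simp only [List.nil_append]
  rw [splitOn_eq, canon_eq]
  rw [show ("/data/media/".toList : List Char) = "/data/media".toList ++ ['/'] from rfl,
      show ("/stash/media/".toList : List Char) = "/stash/media".toList ++ ['/'] from rfl,
      show ("/data/media/torrents/seeding/".toList : List Char) = "/data/media/torrents/seeding".toList ++ ['/'] from rfl,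
      show ("/pool/data/seeds/".toList : List Char) = "/pool/data/seeds".toList ++ ['/'] from rfl,
      show ("/data/media/torrents/seeding/cross-seed-link/".toList : List Char) = "/data/media/torrents/seeding/cross-seed-link".toList ++ ['/'] from rfl,
      show ("/pool/data/cross-seed-link/".toList : List Char) = "/pool/data/cross-seed-link".toList ++ ['/'] from rfl]
  have hb1 : (((p.splitOn '/').take 3) == [[], "data".toList, "media".toList])
      = (p == "/data/media".toList || PySem.Chars.startswith p ("/data/media".toList ++ ['/'])) := by
    have h := cond_eq p "/data/media".toList
    rw [show "/data/media".toList.splitOn '/' = [[], "data".toList, "media".toList] from by decide] at h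
    rw [show ([[], "data".toList, "media".toList] : List (List Char)).length = 3 from rfl] at h
    exact h
  have hb2 : (((p.splitOn '/').take 3) == [[], "stash".toList, "media".toList])
      = (p == "/stash/media".toList || PySem.Chars.startswith p ("/stash/media".toList ++ ['/'])) := by
    have h := cond_eq p "/stash/media".toList
    rw [show "/stash/media".toList.splitOn '/' = [[], "stash".toList, "media".toList] from by decide] at h
    rw [show ([[], "stash".toList, "media".toList] : List (List Char)).length = 3 from rfl] at h
    exact h
  have hb4 : (((p.splitOn '/').take 4) == [[], "pool".toList, "data".toList, "seeds".toList])
      = (p == "/pool/data/seeds".toList || PySem.Chars.startswith p ("/pool/data/seeds".toList ++ ['/'])) := by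
    have h := cond_eq p "/pool/data/seeds".toList
    rw [show "/pool/data/seeds".toList.splitOn '/' = [[], "pool".toList, "data".toList, "seeds".toList] from by decide] at h
    rw [show ([[], "pool".toList, "data".toList, "seeds".toList] : List (List Char)).length = 4 from rfl] at h
    exact h
  have hb6 : (((p.splitOn '/').take 4) == [[], "pool".toList, "data".toList, "cross-seed-link".toList])
      = (p == "/pool/data/cross-seed-link".toList || PySem.Chars.startswith p ("/pool/data/cross-seed-link".toList ++ ['/'])) := by
    have h := cond_eq p "/pool/data/cross-seed-link".toList
    rw [show "/pool/data/cross-seed-link".toList.splitOn '/' = [[], "pool".toList, "data".toList, "cross-seed-link".toList] from by decide] at h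
    rw [show ([[], "pool".toList, "data".toList, "cross-seed-link".toList] : List (List Char)).length = 4 from rfl] at h
    exact h
  rw [hb1, hb2, hb4, hb6]
  have hdd32 : List.drop 2 (List.drop 3 (p.splitOn '/')) = List.drop 5 (p.splitOn '/') := by
    rw [List.drop_drop]
  rw [hdd32]
  have hdd51 : List.drop 1 (List.drop 5 (p.splitOn '/')) = List.drop 6 (p.splitOn '/') := by
    rw [List.drop_drop]
  rw [hdd51]
  by_cases h1 : (p == "/data/media".toList || PySem.Chars.startswith p ("/data/media".toList ++ ['/'])) = true
  · have hpre1 : "/data/media".toList <+: p := cond_prefix h1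
    have h2 : (p == "/stash/media".toList || PySem.Chars.startswith p ("/stash/media".toList ++ ['/'])) = false :=
      condA_false hpre1 2 (by decide) (by decide) (by decide)
    have h4 : (p == "/pool/data/seeds".toList || PySem.Chars.startswith p ("/pool/data/seeds".toList ++ ['/'])) = false :=
      condA_false hpre1 2 (by decide) (by decide) (by decide)
    have h6 : (p == "/pool/data/cross-seed-link".toList || PySem.Chars.startswith p ("/pool/data/cross-seed-link".toList ++ ['/'])) = false :=
      condA_false hpre1 2 (by decide) (by decide) (by decide)
    have ht3 : (p.splitOn '/').take 3 = [[], "data".toList, "media".toList] := beq_iff_eq.mp (hb1.trans h1)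
    have hc5eq := cond_eq p "/data/media/torrents/seeding".toList
    rw [show "/data/media/torrents/seeding".toList.splitOn '/' = [[], "data".toList, "media".toList, "torrents".toList, "seeding".toList] from by decide] at hc5eq
    rw [show ([[], "data".toList, "media".toList, "torrents".toList, "seeding".toList] : List (List Char)).length = 5 from rfl] at hc5eq
    have hb3 : ((((p.splitOn '/').drop 3).take 2) == ["torrents".toList, "seeding".toList])
        = (p == "/data/media/torrents/seeding".toList || PySem.Chars.startswith p ("/data/media/torrents/seeding".toList ++ ['/'])) := by
      rw [← hc5eq, Bool.eq_iff_iff]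
      simp only [beq_iff_eq]
      constructor
      · intro h
        rw [show (5 : Nat) = 3 + 2 from rfl, List.take_add, ht3, h]
        rfl
      · intro h
        have hd : ((p.splitOn '/').take 5).drop 3
            = List.drop 3 [[], "data".toList, "media".toList, "torrents".toList, "seeding".toList] := by rw [h]
        rw [List.drop_take] at hd
        simpa using hd
    rw [hb3]
    have hv1 := variant_eq p "/data/media".toList [[], "stash".toList, "media".toList] (by simp) (cond_cases h1)
    rw [show "/data/media".toList.splitOn '/' = [[], "data".toList, "media".toList] from by decide,
        show ([[], "data".toList, "media".toList] : List (List Char)).length = 3 from rfl,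
        show ("/data/media".toList : List Char).length = 11 from rfl,
        show ['/'].intercalate [[], "stash".toList, "media".toList] = "/stash/media".toList from by decide] at hv1
    by_cases h3 : (p == "/data/media/torrents/seeding".toList || PySem.Chars.startswith p ("/data/media/torrents/seeding".toList ++ ['/'])) = true
    · have ht5 : (p.splitOn '/').take 5 = [[], "data".toList, "media".toList, "torrents".toList, "seeding".toList] :=
        beq_iff_eq.mp (hc5eq.trans h3)
      have hc6eq := cond_eq p "/data/media/torrents/seeding/cross-seed-link".toList
      rw [show "/data/media/torrents/seeding/cross-seed-link".toList.splitOn '/' = [[], "data".toList, "media".toList, "torrents".toList, "seeding".toList, "cross-seed-link".toList] from by decide] at hc6eq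
      rw [show ([[], "data".toList, "media".toList, "torrents".toList, "seeding".toList, "cross-seed-link".toList] : List (List Char)).length = 6 from rfl] at hc6eq
      have hb5 : ((((p.splitOn '/').drop 5).take 1) == ["cross-seed-link".toList])
          = (p == "/data/media/torrents/seeding/cross-seed-link".toList || PySem.Chars.startswith p ("/data/media/torrents/seeding/cross-seed-link".toList ++ ['/'])) := by
        rw [← hc6eq, Bool.eq_iff_iff]
        simp only [beq_iff_eq]
        constructor
        · intro h
          rw [show (6 : Nat) = 5 + 1 from rfl, List.take_add, ht5, h]
          rfl
        · intro h
          have hd : ((p.splitOn '/').take 6).drop 5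
              = List.drop 5 [[], "data".toList, "media".toList, "torrents".toList, "seeding".toList, "cross-seed-link".toList] := by rw [h]
          rw [List.drop_take] at hd
          simpa using hd
      rw [hb5]
      have hv3a := variant_eq p "/data/media/torrents/seeding".toList [[], "pool".toList, "data".toList, "seeds".toList] (by simp) (cond_cases h3)
      rw [show "/data/media/torrents/seeding".toList.splitOn '/' = [[], "data".toList, "media".toList, "torrents".toList, "seeding".toList] from by decide,
          show ([[], "data".toList, "media".toList, "torrents".toList, "seeding".toList] : List (List Char)).length = 5 from rfl,
          show ("/data/media/torrents/seeding".toList : List Char).length = 28 from rfl,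
          show ['/'].intercalate [[], "pool".toList, "data".toList, "seeds".toList] = "/pool/data/seeds".toList from by decide] at hv3a
      have hv3b := variant_eq p "/data/media/torrents/seeding".toList [[], "stash".toList, "media".toList, "downloads".toList, "torrents".toList, "seeding".toList] (by simp) (cond_cases h3)
      rw [show "/data/media/torrents/seeding".toList.splitOn '/' = [[], "data".toList, "media".toList, "torrents".toList, "seeding".toList] from by decide,
          show ([[], "data".toList, "media".toList, "torrents".toList, "seeding".toList] : List (List Char)).length = 5 from rfl,
          show ("/data/media/torrents/seeding".toList : List Char).length = 28 from rfl,
          show ['/'].intercalate [[], "stash".toList, "media".toList, "downloads".toList, "torrents".toList, "seeding".toList] = "/stash/media/downloads/torrents/seeding".toList from by decide] at hv3b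
      by_cases h5 : (p == "/data/media/torrents/seeding/cross-seed-link".toList || PySem.Chars.startswith p ("/data/media/torrents/seeding/cross-seed-link".toList ++ ['/'])) = true
      · have hv5 := variant_eq p "/data/media/torrents/seeding/cross-seed-link".toList [[], "pool".toList, "data".toList, "cross-seed-link".toList] (by simp) (cond_cases h5)
        rw [show "/data/media/torrents/seeding/cross-seed-link".toList.splitOn '/' = [[], "data".toList, "media".toList, "torrents".toList, "seeding".toList, "cross-seed-link".toList] from by decide,
            show ([[], "data".toList, "media".toList, "torrents".toList, "seeding".toList, "cross-seed-link".toList] : List (List Char)).length = 6 from rfl,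
            show ("/data/media/torrents/seeding/cross-seed-link".toList : List Char).length = 44 from rfl,
            show ['/'].intercalate [[], "pool".toList, "data".toList, "cross-seed-link".toList] = "/pool/data/cross-seed-link".toList from by decide] at hv5
        simp only [h1, h2, h3, h4, h5, h6, Bool.false_eq_true, if_true, if_false]; simp only [hv1, hv3a, hv3b, hv5]; try simp only [List.cons_append, List.nil_append]
      · simp only [h1, h2, h3, h4, h5, h6, Bool.false_eq_true, if_true, if_false]; simp only [hv1, hv3a, hv3b]; try simp only [List.cons_append, List.nil_append, List.append_nil]
    · have h5 : (p == "/data/media/torrents/seeding/cross-seed-link".toList || PySem.Chars.startswith p ("/data/media/torrents/seeding/cross-seed-link".toList ++ ['/'])) = false := by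
        by_contra hx
        have hx' := Bool.not_eq_false _ ▸ hx
        have hpre5 := cond_prefix hx'
        have : ("/data/media/torrents/seeding".toList ++ ['/']) <+: p :=
          List.IsPrefix.trans (by decide) hpre5
        exact h3 (Bool.or_eq_true_iff.mpr (Or.inr ((PySem.Chars.startswith_iff _ _).mpr this)))
      simp only [h1, h2, h3, h4, h5, h6, Bool.false_eq_true, if_true, if_false]; simp only [hv1]; try simp only [List.cons_append, List.nil_append, List.append_nil]
  · have h3 : (p == "/data/media/torrents/seeding".toList || PySem.Chars.startswith p ("/data/media/torrents/seeding".toList ++ ['/'])) = false := by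
      by_contra hx
      exact h1 (imp_c1 _ (Bool.not_eq_false _ ▸ hx) (by decide))
    have h5 : (p == "/data/media/torrents/seeding/cross-seed-link".toList || PySem.Chars.startswith p ("/data/media/torrents/seeding/cross-seed-link".toList ++ ['/'])) = false := by
      by_contra hx
      exact h1 (imp_c1 _ (Bool.not_eq_false _ ▸ hx) (by decide))
    by_cases h2 : (p == "/stash/media".toList || PySem.Chars.startswith p ("/stash/media".toList ++ ['/'])) = true
    · have hpre2 : "/stash/media".toList <+: p := cond_prefix h2
      have h4 : (p == "/pool/data/seeds".toList || PySem.Chars.startswith p ("/pool/data/seeds".toList ++ ['/'])) = false :=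
        condA_false hpre2 2 (by decide) (by decide) (by decide)
      have h6 : (p == "/pool/data/cross-seed-link".toList || PySem.Chars.startswith p ("/pool/data/cross-seed-link".toList ++ ['/'])) = false :=
        condA_false hpre2 2 (by decide) (by decide) (by decide)
      have hv2 := variant_eq p "/stash/media".toList [[], "data".toList, "media".toList] (by simp) (cond_cases h2)
      rw [show "/stash/media".toList.splitOn '/' = [[], "stash".toList, "media".toList] from by decide,
          show ([[], "stash".toList, "media".toList] : List (List Char)).length = 3 from rfl,
          show ("/stash/media".toList : List Char).length = 12 from rfl,
          show ['/'].intercalate [[], "data".toList, "media".toList] = "/data/media".toList from by decide] at hv2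
      simp only [h1, h2, h3, h4, h5, h6, Bool.false_eq_true, if_true, if_false]; simp only [hv2]; try simp only [List.cons_append, List.nil_append, List.append_assoc, List.append_nil]
    · by_cases h4 : (p == "/pool/data/seeds".toList || PySem.Chars.startswith p ("/pool/data/seeds".toList ++ ['/'])) = true
      · have hpre4 : "/pool/data/seeds".toList <+: p := cond_prefix h4
        have h6 : (p == "/pool/data/cross-seed-link".toList || PySem.Chars.startswith p ("/pool/data/cross-seed-link".toList ++ ['/'])) = false :=
          condA_false hpre4 12 (by decide) (by decide) (by decide)
        have hv4 := variant_eq p "/pool/data/seeds".toList [[], "data".toList, "media".toList, "torrents".toList, "seeding".toList] (by simp) (cond_cases h4)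
        rw [show "/pool/data/seeds".toList.splitOn '/' = [[], "pool".toList, "data".toList, "seeds".toList] from by decide,
            show ([[], "pool".toList, "data".toList, "seeds".toList] : List (List Char)).length = 4 from rfl,
            show ("/pool/data/seeds".toList : List Char).length = 16 from rfl,
            show ['/'].intercalate [[], "data".toList, "media".toList, "torrents".toList, "seeding".toList] = "/data/media/torrents/seeding".toList from by decide] at hv4
        simp only [h1, h2, h3, h4, h5, h6, Bool.false_eq_true, if_true, if_false]; simp only [hv4]; try simp only [List.cons_append, List.nil_append, List.append_assoc, List.append_nil]
      · by_cases h6 : (p == "/pool/data/cross-seed-link".toList || PySem.Chars.startswith p ("/pool/data/cross-seed-link".toList ++ ['/'])) = true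
        · have hv6 := variant_eq p "/pool/data/cross-seed-link".toList [[], "data".toList, "media".toList, "torrents".toList, "seeding".toList, "cross-seed-link".toList] (by simp) (cond_cases h6)
          rw [show "/pool/data/cross-seed-link".toList.splitOn '/' = [[], "pool".toList, "data".toList, "cross-seed-link".toList] from by decide,
              show ([[], "pool".toList, "data".toList, "cross-seed-link".toList] : List (List Char)).length = 4 from rfl,
              show ("/pool/data/cross-seed-link".toList : List Char).length = 26 from rfl,
              show ['/'].intercalate [[], "data".toList, "media".toList, "torrents".toList, "seeding".toList, "cross-seed-link".toList] = "/data/media/torrents/seeding/cross-seed-link".toList from by decide] at hv6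
          simp only [h1, h2, h3, h4, h5, h6, Bool.false_eq_true, if_true, if_false]; simp only [hv6]; try simp only [List.cons_append, List.nil_append, List.append_assoc, List.append_nil]
        · simp only [h1, h2, h3, h4, h5, h6, Bool.false_eq_true, if_false]; try simp only [List.append_nil]


-- ===== VERDICT (by name: the statement is the Claim_ definition above) =====
theorem alias_variants_spec : Claim_equal_alias_variants := by
  intro path _
  unfold Spec_alias_variants
  exact main_eq path
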